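-- pv_equiv track=rewrite | github.com/PANhuihuihuihui/Fishing-spot-recommendation | data/data_collection.py | create_unique_lake_names
-- ===== SOURCE A (Python) =====
-- def create_unique_lake_names(lake_info_by_county):
--     unique_lake_by_county = {}
--
--     for county, lakes in lake_info_by_county.items():
--         unique_lake_by_county[county] = {}
--
--         for lake, url in lakes.items():
--             unique_name = lake.split(' (')[0]
--
--             if unique_name not in unique_lake_by_county[county]:
--                 unique_lake_by_county[county][unique_name] = {
--                     'urls': [url]
--                 }
--             else:
--                 unique_lake_by_county[county][unique_name]['urls'].append(url)
--
--     return unique_lake_by_county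
-- ===== SOURCE B (Python) =====
-- def create_unique_lake_names(lake_info_by_county):
--     result = {}
--     for county, lakes in lake_info_by_county.items():
--         names = list(dict.fromkeys(lake.split(' (')[0] for lake in lakes))
--         result[county] = {
--             name: {'urls': [url for lake, url in lakes.items()
--                             if lake.split(' (')[0] == name]}
--             for name in names
--         }
--     return result
-- ===== Notes on version B (the rewrite author's own statement) =====
-- stated objective: simpler
-- what changed: A grows each county's dict incrementally with an insert-or-append branch per lake; B first dedups the normalized names in first-occurrence order and then builds each group's url list in one comprehension that filters the county's lakes by name.
import Mathlib
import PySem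

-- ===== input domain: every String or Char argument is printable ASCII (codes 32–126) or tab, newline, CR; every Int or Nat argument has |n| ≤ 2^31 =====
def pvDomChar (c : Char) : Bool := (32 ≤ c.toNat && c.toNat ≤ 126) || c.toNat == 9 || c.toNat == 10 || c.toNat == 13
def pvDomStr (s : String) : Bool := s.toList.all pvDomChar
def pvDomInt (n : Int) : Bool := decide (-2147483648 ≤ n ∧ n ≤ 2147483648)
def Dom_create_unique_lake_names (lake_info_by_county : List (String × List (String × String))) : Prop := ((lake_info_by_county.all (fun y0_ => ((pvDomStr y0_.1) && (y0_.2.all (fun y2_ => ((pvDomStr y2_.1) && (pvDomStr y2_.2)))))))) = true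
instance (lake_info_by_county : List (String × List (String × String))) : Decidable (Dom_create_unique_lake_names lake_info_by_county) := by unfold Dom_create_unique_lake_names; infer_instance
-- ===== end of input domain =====

-- B replaces A's incremental insert-or-append hash-grouping by a two-pass gather
-- (dedup the normalized names, then collect each name's urls with a filter); objective: simpler.


-- ===== PORT A =====
-- lake.split(' (')[0]: split? is `some` because the separator " (" is nonempty, and a
-- split result is always a nonempty list, so getD/headD never take their defaults.
def pvNorm (lake : String) : String := ((PySem.Str.split? lake " (").getD []).headD ""

-- body of A's inner loop (the state is the whole outer dict, as in the Python)
def pvStepLake (county : String)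
    (d : PySem.Dict String (PySem.Dict String (PySem.Dict String (List String))))
    (q : String × String) :
    PySem.Dict String (PySem.Dict String (PySem.Dict String (List String))) :=
  let unique_name := pvNorm q.1
  let inner := d.getD county PySem.Dict.empty
  if inner.contains unique_name = false then
    d.insert county (inner.insert unique_name (PySem.Dict.ofList [("urls", [q.2])]))
  else
    d.insert county (inner.modify unique_name PySem.Dict.empty
      (fun v => v.modify "urls" [] (fun us => us ++ [q.2])))

def create_unique_lake_names (lake_info_by_county : List (String × List (String × String))) : List (String × List (String × List (String × List String))) :=
  (lake_info_by_county.foldl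
      (fun d p => p.2.foldl (pvStepLake p.1) (d.insert p.1 PySem.Dict.empty))
      PySem.Dict.empty).items.map
    (fun c => (c.1, c.2.items.map (fun e => (e.1, e.2.items))))

-- ===== PORT B =====
def pvBuildCounty (lakes : List (String × String)) : List (String × List (String × List String)) :=
  let names := PySem.List.dedup (lakes.map (fun q => pvNorm q.1))
  names.map (fun n => (n, [("urls", (lakes.filter (fun q => pvNorm q.1 == n)).map (fun q => q.2))]))

def create_unique_lake_names_alt (lake_info_by_county : List (String × List (String × String))) : List (String × List (String × List (String × List String))) :=
  (lake_info_by_county.foldl (fun d p => d.insert p.1 (pvBuildCounty p.2))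
      PySem.Dict.empty).items

-- ===== PRECONDITION & SPEC =====
def Spec_create_unique_lake_names (lake_info_by_county : List (String × List (String × String))) (out : List (String × List (String × List (String × List String)))) : Prop := out = create_unique_lake_names_alt lake_info_by_county
instance (lake_info_by_county : List (String × List (String × String))) (out : List (String × List (String × List (String × List String)))) : Decidable (Spec_create_unique_lake_names lake_info_by_county out) := by unfold Spec_create_unique_lake_names; infer_instance

-- ===== CLAIM (what is proved, stated in full; the proofs are below) =====
def Claim_equal_create_unique_lake_names : Prop := ∀ (lake_info_by_county : List (String × List (String × String))), Dom_create_unique_lake_names lake_info_by_county → Spec_create_unique_lake_names lake_info_by_county (create_unique_lake_names lake_info_by_county)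

-- ===== LEMMAS AND PROOFS =====

-- A's inner loop body, decoupled from the outer dict
def pvStepI (inner : PySem.Dict String (PySem.Dict String (List String)))
    (q : String × String) : PySem.Dict String (PySem.Dict String (List String)) :=
  if inner.contains (pvNorm q.1) = false then
    inner.insert (pvNorm q.1) (PySem.Dict.ofList [("urls", [q.2])])
  else
    inner.modify (pvNorm q.1) PySem.Dict.empty
      (fun v => v.modify "urls" [] (fun us => us ++ [q.2]))

-- names and urls of one county, and A's canonical inner state
def pvNames (lakes : List (String × String)) : List String :=
  PySem.List.dedup (lakes.map (fun q => pvNorm q.1))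

def pvUrls (lakes : List (String × String)) (n : String) : List String :=
  (lakes.filter (fun q => pvNorm q.1 == n)).map (fun q => q.2)

def pvCanA (lakes : List (String × String)) : PySem.Dict String (PySem.Dict String (List String)) :=
  PySem.Dict.mk ((pvNames lakes).map (fun n => (n, PySem.Dict.mk [("urls", pvUrls lakes n)])))

-- A's inner loop only ever touches the entry at `county`
theorem pv_fold_stepLake (county : String) (lakes : List (String × String))
    (d : PySem.Dict String (PySem.Dict String (PySem.Dict String (List String))))
    (z : PySem.Dict String (PySem.Dict String (List String))) :
    lakes.foldl (pvStepLake county) (d.insert county z)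
      = d.insert county (lakes.foldl pvStepI z) := by
  induction lakes generalizing z with
  | nil => rfl
  | cons q rest ih =>
    have hone : pvStepLake county (d.insert county z) q = d.insert county (pvStepI z q) := by
      simp only [pvStepLake, pvStepI, PySem.Dict.getD_insert_self, PySem.Dict.insert_insert_self]
      split_ifs <;> rfl
    simp only [List.foldl_cons, hone, ih]

theorem pv_dedup_append {a : String} (xs : List String) :
    PySem.List.dedup (xs ++ [a])
      = if a ∈ xs then PySem.List.dedup xs else PySem.List.dedup xs ++ [a] := by
  have h1 : PySem.List.dedup (xs ++ [a]) = PySem.Set.add (PySem.List.dedup xs) a := by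
    simp only [PySem.List.dedup_eq_ofList, PySem.Set.ofList_eq_foldl, List.foldl_append,
      List.foldl_cons, List.foldl_nil]
  have h2 : PySem.Set.contains (PySem.List.dedup xs) a = decide (a ∈ xs) := by
    simp [PySem.Set.contains]
  rw [h1]
  by_cases h : a ∈ xs <;> simp [PySem.Set.add, h2, h]

theorem pv_any_beq (xs : List String) (n : String) :
    xs.any (fun x => x == n) = decide (n ∈ xs) := by
  induction xs with
  | nil => simp
  | cons a t ih =>
    by_cases h : a = n
    · simp [h]
    · have h2 : ¬ (n = a) := fun hn => h hn.symm
      simp [h, h2, ih]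

theorem pv_contains_canA (p : List (String × String)) (n : String) :
    (pvCanA p).contains n = decide (n ∈ pvNames p) := by
  rw [pvCanA, PySem.Dict.contains_mk, List.any_map]
  exact pv_any_beq (pvNames p) n

theorem pv_names_append (p : List (String × String)) (q : String × String) :
    pvNames (p ++ [q]) = if pvNorm q.1 ∈ pvNames p then pvNames p
      else pvNames p ++ [pvNorm q.1] := by
  simp only [pvNames, List.map_append, List.map_cons, List.map_nil, pv_dedup_append]
  have hmem : (pvNorm q.1 ∈ p.map (fun q => pvNorm q.1))
      ↔ pvNorm q.1 ∈ PySem.List.dedup (p.map (fun q => pvNorm q.1)) :=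
    (PySem.List.mem_dedup _ _).symm
  simp only [hmem]

theorem pv_urls_append (p : List (String × String)) (q : String × String) (n : String) :
    pvUrls (p ++ [q]) n = pvUrls p n ++ (if pvNorm q.1 == n then [q.2] else []) := by
  simp only [pvUrls, List.filter_append, List.map_append]
  by_cases h : pvNorm q.1 == n <;> simp [List.filter, h]

theorem pv_urls_nil_of_not_mem (p : List (String × String)) (n : String)
    (h : n ∉ pvNames p) : pvUrls p n = [] := by
  simp only [pvNames, PySem.List.mem_dedup, List.mem_map] at h
  push_neg at h
  simp only [pvUrls, List.map_eq_nil_iff, List.filter_eq_nil_iff]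
  intro q hq
  simp [h q hq]

theorem pv_ofList_single (v : List String) :
    PySem.Dict.ofList [("urls", v)] = PySem.Dict.mk [("urls", v)] := rfl

theorem pv_modify_single (u : List String) (f : List String → List String) :
    (PySem.Dict.mk [("urls", u)]).modify "urls" [] f = PySem.Dict.mk [("urls", f u)] := by
  apply PySem.Dict.ext
  simp [PySem.Dict.modify, PySem.Dict.getD, PySem.Dict.get?, PySem.Dict.items_insert_of_contains,
    PySem.Dict.contains_mk]

theorem pv_keys_canA (p : List (String × String)) : (pvCanA p).keys = pvNames p := by
  simp [pvCanA, PySem.Dict.keys_mk, List.map_map, Function.comp_def]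

theorem pv_getD_canA (p : List (String × String)) (n : String) (h : n ∈ pvNames p) :
    (pvCanA p).getD n PySem.Dict.empty = PySem.Dict.mk [("urls", pvUrls p n)] := by
  apply PySem.Dict.getD_of_mem_items
  · exact List.mem_map_of_mem h
  · rw [pv_keys_canA]; exact PySem.List.nodup_dedup _

theorem pv_stepI_canA (p : List (String × String)) (q : String × String) :
    pvStepI (pvCanA p) q = pvCanA (p ++ [q]) := by
  have hc := pv_contains_canA p (pvNorm q.1)
  by_cases h : pvNorm q.1 ∈ pvNames p
  · rw [pvStepI, hc]
    simp only [h, decide_true]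
    rw [if_neg (by simp)]
    rw [PySem.Dict.modify, pv_getD_canA p _ h, pv_modify_single]
    apply PySem.Dict.ext
    rw [PySem.Dict.items_insert_of_contains _ _ (by rw [hc]; simp [h])]
    show ((pvNames p).map _).map _ = _
    rw [List.map_map, pvCanA, pv_names_append, if_pos h]
    apply List.map_congr_left
    intro m hm
    by_cases hmn : m = pvNorm q.1
    · subst hmn
      simp [pv_urls_append]
    · have h1 : (m == pvNorm q.1) = false := by simp [hmn]
      have h2 : (pvNorm q.1 == m) = false := by
        simp only [beq_eq_false_iff_ne, ne_eq]
        exact fun e => hmn e.symm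
      simp [Function.comp, h1, pv_urls_append, h2]
  · rw [pvStepI, hc]
    simp only [h, decide_false]
    simp only [if_true]
    apply PySem.Dict.ext
    rw [PySem.Dict.items_insert_of_not_contains _ _ (by rw [hc]; simp [h])]
    rw [pvCanA, pvCanA, pv_names_append, if_neg h, List.map_append]
    congr 1
    · apply List.map_congr_left
      intro m hm
      have hmn : (pvNorm q.1 == m) = false := by
        simp only [beq_eq_false_iff_ne, ne_eq]
        exact fun e => h (e ▸ hm)
      simp [pv_urls_append, hmn]
    · simp [pv_ofList_single, pv_urls_append, pv_urls_nil_of_not_mem p _ h]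

theorem pv_foldI_canA (lakes : List (String × String)) :
    lakes.foldl pvStepI PySem.Dict.empty = pvCanA lakes := by
  induction lakes using List.reverseRecOn with
  | nil => rfl
  | append_singleton p q ih =>
    rw [List.foldl_append, ih, List.foldl_cons, List.foldl_nil, pv_stepI_canA]

theorem pv_canA_conv (lakes : List (String × String)) :
    (pvCanA lakes).items.map (fun e => (e.1, e.2.items)) = pvBuildCounty lakes := by
  simp [pvCanA, pvBuildCounty, pvNames, pvUrls, List.map_map, Function.comp_def]

theorem pv_outer (l : List (String × List (String × String)))
    (dA : PySem.Dict String (PySem.Dict String (PySem.Dict String (List String))))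
    (dB : PySem.Dict String (List (String × List (String × List String))))
    (h : dB.items = dA.items.map (fun c => (c.1, c.2.items.map (fun e => (e.1, e.2.items))))) :
    (l.foldl (fun d p => d.insert p.1 (pvCanA p.2)) dA).items.map
        (fun c => (c.1, c.2.items.map (fun e => (e.1, e.2.items))))
      = (l.foldl (fun d p => d.insert p.1 (pvBuildCounty p.2)) dB).items := by
  induction l generalizing dA dB with
  | nil => exact h.symm
  | cons p rest ih =>
    simp only [List.foldl_cons]
    apply ih
    have hkeys : dB.keys = dA.keys := by
      show dB.items.map _ = dA.items.map _
      rw [h, List.map_map]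
      rfl
    have hcont : dB.contains p.1 = dA.contains p.1 := by
      rw [PySem.Dict.contains_eq_decide_mem_keys, PySem.Dict.contains_eq_decide_mem_keys, hkeys]
    by_cases hc : dA.contains p.1 = true
    · rw [PySem.Dict.items_insert_of_contains _ _ (by rw [hcont]; exact hc),
        PySem.Dict.items_insert_of_contains _ _ hc, h, List.map_map, List.map_map]
      apply List.map_congr_left
      intro c _
      by_cases hk : c.1 = p.1
      · simp [Function.comp_def, hk, pv_canA_conv]
      · simp [Function.comp_def, hk]
    · rw [PySem.Dict.items_insert_of_not_contains _ _ (by rw [hcont]; simpa using hc),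
        PySem.Dict.items_insert_of_not_contains _ _ (by simpa using hc), h, List.map_append]
      simp [pv_canA_conv]

-- ===== VERDICT (by name: the statement is the Claim_ definition above) =====
theorem create_unique_lake_names_spec : Claim_equal_create_unique_lake_names := by
  intro l _
  unfold Spec_create_unique_lake_names create_unique_lake_names create_unique_lake_names_alt
  have hstep : (fun (d : PySem.Dict String (PySem.Dict String (PySem.Dict String (List String)))) (p : String × List (String × String)) =>
        p.2.foldl (pvStepLake p.1) (d.insert p.1 PySem.Dict.empty))
      = (fun d p => d.insert p.1 (pvCanA p.2)) := by
    funext d p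
    rw [pv_fold_stepLake, pv_foldI_canA]
  rw [hstep]
  exact pv_outer l _ _ rfl
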